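-- pv_equiv track=rewrite | github.com/Ticasslo/Nhom5_DoAnAI_CakeCollectGame | DoAnAI/searchSimulatedAnnealing.py | _check_combo_sim
-- ===== SOURCE A (Python) =====
-- COMBO_RULES = {
--     0: (2, 200),
--     1: (3, 300),
--     2: (4, 400),
--     3: (5, 500),
--     4: (6, 600),
-- }
--
-- def _check_combo_sim(bag, allowed_objs):
--     """
--     Kiểm tra xem bag (tuple) có chứa segment combo hợp lệ cho bất kỳ obj nào trong allowed_objs.
--     Trả về True ngay khi tìm thấy.
--     """
--     n = len(bag)
--     for obj in allowed_objs:
--         need, _ = COMBO_RULES[obj]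
--         if n < need:
--             continue
--         # Duyệt các segment độ dài need
--         for i in range(n - need + 1):
--             if all(bag[i+j] == obj for j in range(need)):
--                 return True
--     return False
-- ===== SOURCE B (Python) =====
-- COMBO_RULES = {
--     0: (2, 200),
--     1: (3, 300),
--     2: (4, 400),
--     3: (5, 500),
--     4: (6, 600),
-- }
--
-- def _check_combo_sim(bag, allowed_objs):
--     # One left-to-right pass maintaining the length of the current run of
--     # identical elements; return True as soon as a required run is complete.
--     need = {obj: COMBO_RULES[obj][0] for obj in allowed_objs}
--     prev = None
--     run = 0
--     for x in bag:
--         run = run + 1 if prev is not None and x == prev else 1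
--         prev = x
--         k = need.get(x)
--         if k is not None and run >= k:
--             return True
--     return False
-- ===== Notes on version B (the rewrite author's own statement) =====
-- stated objective: faster
-- what changed: Replaced the per-obj scan of every overlapping window with a single left-to-right pass over bag that maintains the current consecutive-run length and a precomputed obj->required-length map, returning as soon as a run is long enough.
-- outside the precondition, e.g. on _check_combo_sim((0, 0), [0, 9]): A returns True, B raises KeyError
import Mathlib
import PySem

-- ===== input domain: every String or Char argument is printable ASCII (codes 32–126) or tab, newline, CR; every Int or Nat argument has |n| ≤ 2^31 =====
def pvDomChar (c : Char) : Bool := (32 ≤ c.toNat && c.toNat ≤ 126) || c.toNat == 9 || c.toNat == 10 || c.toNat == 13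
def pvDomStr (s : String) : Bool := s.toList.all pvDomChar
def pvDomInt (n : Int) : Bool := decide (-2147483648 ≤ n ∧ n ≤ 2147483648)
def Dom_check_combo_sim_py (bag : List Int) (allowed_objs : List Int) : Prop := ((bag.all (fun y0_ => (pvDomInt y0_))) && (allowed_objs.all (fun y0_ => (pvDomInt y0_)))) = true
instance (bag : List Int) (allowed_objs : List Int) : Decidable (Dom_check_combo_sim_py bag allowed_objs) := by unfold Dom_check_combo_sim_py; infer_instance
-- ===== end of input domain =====

-- B replaces A's per-obj scan of all overlapping windows by one pass over bag
-- maintaining the current consecutive-run length (objective: faster).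

-- ===== PORT A =====
-- module constant COMBO_RULES (shared by both Pythons)
def comboRules : PySem.Dict Int (Int × Int) :=
  PySem.Dict.ofList [(0, (2, 200)), (1, (3, 300)), (2, (4, 400)), (3, (5, 500)), (4, (6, 600))]

-- inner 'for i in range(n - need + 1): if all(bag[i+j] == obj for j in range(need))'
-- (bag[i+j] is always in range here, so pyGetD is exact)
def aInner (bag : List Int) (obj : Int) (need : Int) : Bool :=
  (PySem.List.pyRange 0 ((bag.length : Int) - need + 1) 1).any (fun i =>
    (PySem.List.pyRange 0 need 1).all (fun j => PySem.List.pyGetD bag (i + j) 0 == obj))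

def aLoop (bag : List Int) : List Int → Bool
  | [] => false
  | obj :: rest =>
    match comboRules.get? obj with
    | none => false        -- Python raises KeyError here; excluded by Pre_
    | some (need, _) =>
      if (bag.length : Int) < need then aLoop bag rest
      else if aInner bag obj need then true else aLoop bag rest

def check_combo_sim_py (bag : List Int) (allowed_objs : List Int) : Bool :=
  aLoop bag allowed_objs

-- ===== PORT B =====
-- COMBO_RULES[obj][0]; total form (Python raises on a missing key; excluded by Pre_)
def bNeedOf (obj : Int) : Int := (((comboRules.get? obj).map Prod.fst).getD 0)

-- the dict comprehension {obj: COMBO_RULES[obj][0] for obj in allowed_objs}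
def bNeedMap (allowed_objs : List Int) : PySem.Dict Int Int :=
  allowed_objs.foldl (fun d o => d.insert o (bNeedOf o)) PySem.Dict.empty

def bLoop (need : PySem.Dict Int Int) : List Int → Option Int → Int → Bool
  | [], _, _ => false
  | x :: rest, prev, run =>
    let run' := if prev = some x then run + 1 else 1
    match need.get? x with
    | some k => if k ≤ run' then true else bLoop need rest (some x) run'
    | none => bLoop need rest (some x) run'

def check_combo_sim_py_alt (bag : List Int) (allowed_objs : List Int) : Bool :=
  bLoop (bNeedMap allowed_objs) bag none 0

-- ===== PRECONDITION & SPEC =====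
-- Pre_ excludes inputs where some obj in allowed_objs is not a key of COMBO_RULES:
-- there A either raises KeyError or (lazily) may return True before reaching the
-- invalid obj, while B's eager dict comprehension always raises KeyError.
def Pre_check_combo_sim_py (bag : List Int) (allowed_objs : List Int) : Prop :=
  ∀ o ∈ allowed_objs, 0 ≤ o ∧ o < 5
instance (bag : List Int) (allowed_objs : List Int) : Decidable (Pre_check_combo_sim_py bag allowed_objs) := by unfold Pre_check_combo_sim_py; infer_instance

def pvWitness_check_combo_sim_py : List Int × List Int := ([1, 0, 0, 1], [0, 1])

def Spec_check_combo_sim_py (bag : List Int) (allowed_objs : List Int) (out : Bool) : Prop := out = check_combo_sim_py_alt bag allowed_objs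
instance (bag : List Int) (allowed_objs : List Int) (out : Bool) : Decidable (Spec_check_combo_sim_py bag allowed_objs out) := by unfold Spec_check_combo_sim_py; infer_instance

-- ===== CLAIM (what is proved, stated in full; the proofs are below) =====
def Claim_equal_check_combo_sim_py : Prop := ∀ (bag : List Int) (allowed_objs : List Int), Dom_check_combo_sim_py bag allowed_objs → Pre_check_combo_sim_py bag allowed_objs → Spec_check_combo_sim_py bag allowed_objs (check_combo_sim_py bag allowed_objs)

-- ===== LEMMAS AND PROOFS =====

theorem window_iff_infix (bag : List Int) (obj : Int) (k : Nat) :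
    (∃ i : Nat, i + k ≤ bag.length ∧ ∀ j < k, bag.getD (i + j) 0 = obj) ↔
      List.replicate k obj <:+: bag := by
  constructor
  · rintro ⟨i, hik, hall⟩
    have hmid : (bag.drop i).take k = List.replicate k obj := by
      apply List.eq_replicate_iff.mpr
      constructor
      · simp; omega
      · intro b hb
        obtain ⟨j, hj, hjb⟩ := List.mem_iff_getElem.mp hb
        have hjk : j < k := by simp at hj; omega
        rw [List.getElem_take, List.getElem_drop] at hjb
        have := hall j hjk
        rw [List.getD_eq_getElem bag 0 (by omega)] at this
        rw [← hjb]; exact this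
    refine ⟨bag.take i, bag.drop (i + k), ?_⟩
    rw [← hmid]
    have h1 : (bag.drop i).drop k = bag.drop (i + k) := by
      rw [List.drop_drop, Nat.add_comm]
    rw [List.append_assoc, ← h1, List.take_append_drop]
    exact List.take_append_drop i bag
  · rintro ⟨s, t, h⟩
    refine ⟨s.length, ?_, ?_⟩
    · have := congrArg List.length h
      simp at this; omega
    · intro j hj
      subst h
      rw [List.append_assoc]
      rw [List.getD_eq_getElem?_getD, List.getElem?_append_right (by omega)]
      have : s.length + j - s.length = j := by omega
      rw [this, List.getElem?_append_left (by simpa using hj), List.getElem?_replicate]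
      simp [hj]

theorem replicate_infix_replicate (y x : Int) (k r : Nat) :
    List.replicate k y <:+: List.replicate r x ↔ k ≤ r ∧ (k = 0 ∨ y = x) := by
  constructor
  · intro h
    refine ⟨by simpa using h.length_le, ?_⟩
    rcases Nat.eq_zero_or_pos k with hk | hk
    · exact Or.inl hk
    · refine Or.inr ?_
      have hy : y ∈ List.replicate r x := h.subset (by simp <;> omega)
      exact List.eq_of_mem_replicate hy
  · rintro ⟨hle, rfl | rfl⟩
    · simp
    · refine ⟨[], List.replicate (r - k) y, ?_⟩
      simp only [List.nil_append, ← List.replicate_add]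
      congr 1
      omega
theorem infix_straddle (y x c : Int) (k r : Nat) (hk : 1 ≤ k) (hcx : c ≠ x)
    (rest : List Int) :
    List.replicate k y <:+: (List.replicate r c ++ x :: rest) ↔
      (List.replicate k y <:+: List.replicate r c ∨
       List.replicate k y <:+: (x :: rest)) := by
  constructor
  · rintro ⟨s, t, h⟩
    by_cases h1 : r ≤ s.length
    · refine Or.inr ⟨s.drop r, t, ?_⟩
      have hthis := congrArg (List.drop r) h
      simp only [List.drop_append, List.length_append, List.length_replicate] at hthis
      have e1 : r - s.length = 0 := by omega
      have e2 : r - (s.length + k) = 0 := by omega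
      rw [e1, e2] at hthis
      simp at hthis
      simpa [List.append_assoc] using hthis
    · by_cases h2 : s.length + k ≤ r
      · refine Or.inl ?_
        have hy : y = c := by
          have hidx := congrArg (fun l => l[s.length]?) h
          simp only [List.append_assoc] at hidx
          rw [List.getElem?_append_right (by omega), List.getElem?_append_left (by simp <;> omega)] at hidx
          rw [List.getElem?_append_left (by simp <;> omega)] at hidx
          simp [List.getElem?_replicate] at hidx
          rw [if_pos (by omega), if_pos (by omega)] at hidx
          exact Option.some_injective _ hidx
        subst hy
        rw [replicate_infix_replicate]
        exact ⟨by omega, Or.inr rfl⟩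
      · exfalso
        -- window covers indices r-1 (value c) and r (value x)
        have hy1 : y = c := by
          have := congrArg (fun l => l[r-1]?) h
          simp only [List.append_assoc] at this
          rw [List.getElem?_append_right (by omega), List.getElem?_append_left (by simp <;> omega)] at this
          rw [List.getElem?_append_left (by simp <;> omega)] at this
          simp [List.getElem?_replicate] at this
          rw [if_pos (by omega), if_pos (by omega)] at this
          exact (Option.some_injective _ this)
        have hy2 : y = x := by
          have := congrArg (fun l => l[r]?) h
          simp only [List.append_assoc] at this
          rw [List.getElem?_append_right (by omega), List.getElem?_append_left (by simp <;> omega)] at this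
          rw [List.getElem?_append_right (by simp <;> omega)] at this
          simp [List.getElem?_replicate] at this
          exact this.2
        exact hcx (hy1 ▸ hy2 ▸ rfl)
  · rintro (h | h)
    · exact h.trans ⟨[], x :: rest, by simp⟩
    · exact h.trans ⟨List.replicate r c, [], by simp⟩

theorem comboRules_get_valid (obj : Int) (h0 : 0 ≤ obj) (h5 : obj < 5) :
    comboRules.get? obj = some (obj + 2, (obj + 2) * 100) := by
  interval_cases obj <;> decide

theorem bNeedOf_valid (obj : Int) (h0 : 0 ≤ obj) (h5 : obj < 5) :
    bNeedOf obj = obj + 2 := by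
  simp [bNeedOf, comboRules_get_valid obj h0 h5]

theorem get?_foldl_insert (g : Int → Int) (x : Int) :
    ∀ (l : List Int) (d : PySem.Dict Int Int),
      (l.foldl (fun d o => d.insert o (g o)) d).get? x =
        if x ∈ l then some (g x) else d.get? x := by
  intro l
  induction l with
  | nil => intro d; simp
  | cons o rest ih =>
    intro d
    rw [List.foldl_cons, ih]
    by_cases hm : x ∈ rest
    · simp [hm]
    · rw [PySem.Dict.get?_insert]
      by_cases he : x = o <;> simp [hm, he]

theorem bNeedMap_get? (allowed : List Int) (x : Int) :
    (bNeedMap allowed).get? x = if x ∈ allowed then some (bNeedOf x) else none := by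
  rw [bNeedMap, get?_foldl_insert]
  simp [PySem.Dict.get?_empty]

theorem aInner_iff (bag : List Int) (obj need : Int) (h1 : 1 ≤ need)
    (hlen : need ≤ (bag.length : Int)) :
    aInner bag obj need = true ↔ List.replicate need.toNat obj <:+: bag := by
  rw [← window_iff_infix]
  rw [aInner, List.any_eq_true]
  constructor
  · rintro ⟨i, hi, hall⟩
    rw [PySem.List.mem_pyRange_one] at hi
    rw [List.all_eq_true] at hall
    refine ⟨i.toNat, by omega, ?_⟩
    intro j hj
    have hmem : (j : Int) ∈ PySem.List.pyRange 0 need 1 := by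
      rw [PySem.List.mem_pyRange_one]; omega
    have := hall _ hmem
    rw [beq_iff_eq] at this
    have hidx : i + (j : Int) = ((i.toNat + j : Nat) : Int) := by omega
    rw [hidx, PySem.List.pyGetD_natCast] at this
    exact this
  · rintro ⟨i, hik, hall⟩
    refine ⟨(i : Int), ?_, ?_⟩
    · rw [PySem.List.mem_pyRange_one]; omega
    · rw [List.all_eq_true]
      intro j hj
      rw [PySem.List.mem_pyRange_one] at hj
      rw [beq_iff_eq]
      have hidx : (i : Int) + j = ((i + j.toNat : Nat) : Int) := by omega
      rw [hidx, PySem.List.pyGetD_natCast]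
      exact hall j.toNat (by omega)

theorem aLoop_iff (bag : List Int) (allowed : List Int)
    (hpre : ∀ o ∈ allowed, 0 ≤ o ∧ o < 5) :
    aLoop bag allowed = true ↔
      ∃ o ∈ allowed, List.replicate (o + 2).toNat o <:+: bag := by
  induction allowed with
  | nil => simp [aLoop]
  | cons obj rest ih =>
    obtain ⟨h0, h5⟩ := hpre obj (List.mem_cons_self)
    have hg := comboRules_get_valid obj h0 h5
    have ihr := ih (fun o ho => hpre o (List.mem_cons_of_mem _ ho))
    rw [show aLoop bag (obj :: rest) =
        (if (bag.length : Int) < obj + 2 then aLoop bag rest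
         else if aInner bag obj (obj + 2) then true else aLoop bag rest) by
      simp [aLoop, hg]]
    by_cases hlen : (bag.length : Int) < obj + 2
    · rw [if_pos hlen, ihr]
      constructor
      · rintro ⟨o, ho, h⟩
        exact ⟨o, List.mem_cons_of_mem _ ho, h⟩
      · rintro ⟨o, ho, h⟩
        rcases List.mem_cons.mp ho with rfl | ho'
        · exfalso
          have := h.length_le
          simp at this
          omega
        · exact ⟨o, ho', h⟩
    · rw [if_neg hlen]
      have hiff := aInner_iff bag obj (obj + 2) (by omega) (by omega)
      by_cases ha : aInner bag obj (obj + 2) = true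
      · rw [if_pos ha]
        simp only [true_iff]
        exact ⟨obj, List.mem_cons_self, hiff.mp ha⟩
      · rw [if_neg ha, ihr]
        constructor
        · rintro ⟨o, ho, h⟩
          exact ⟨o, List.mem_cons_of_mem _ ho, h⟩
        · rintro ⟨o, ho, h⟩
          rcases List.mem_cons.mp ho with rfl | ho'
          · exact absurd (hiff.mpr h) ha
          · exact ⟨o, ho', h⟩

theorem bLoop_iff (need : PySem.Dict Int Int)
    (hpos : ∀ x k, need.get? x = some k → 1 ≤ k) :
    ∀ (l : List Int) (c : Int) (r : Int) (prev : Option Int),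
      ((prev = none ∧ r = 0) ∨ (prev = some c ∧ 1 ≤ r)) →
      (∀ y k, need.get? y = some k →
        ¬ List.replicate k.toNat y <:+: List.replicate r.toNat c) →
      (bLoop need l prev r = true ↔
        ∃ y k, need.get? y = some k ∧
          List.replicate k.toNat y <:+: (List.replicate r.toNat c ++ l)) := by
  intro l
  induction l with
  | nil =>
    intro c r prev _ hnot
    refine iff_of_false (by simp [bLoop]) ?_
    rintro ⟨y, k, hy, hinf⟩
    exact hnot y k hy (by simpa using hinf)
  | cons x rest ih =>
    intro c r prev hstate hnot
    rcases hstate with ⟨rfl, rfl⟩ | ⟨rfl, hr⟩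
    · -- prev = none, r = 0 : first element, run' = 1
      have hpadeq : (List.replicate (0:Int).toNat c ++ x :: rest) =
          (List.replicate (1:Int).toNat x ++ rest) := by simp
      rw [hpadeq]
      rcases hgx : need.get? x with _ | k
      · have hstep : bLoop need (x :: rest) none 0 = bLoop need rest (some x) 1 := by
          simp [bLoop, hgx]
        have hnot' : ∀ y k, need.get? y = some k →
            ¬ List.replicate k.toNat y <:+: List.replicate (1:Int).toNat x := by
          intro y k hy hinf
          rcases (replicate_infix_replicate y x k.toNat (1:Int).toNat).mp hinf with ⟨hle, h0 | rfl⟩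
          · have := hpos y k hy; omega
          · rw [hy] at hgx; cases hgx
        rw [hstep, ih x 1 (some x) (Or.inr ⟨rfl, le_refl 1⟩) hnot']
      · have hstep : bLoop need (x :: rest) none 0 =
            (if k ≤ (1:Int) then true else bLoop need rest (some x) 1) := by
          simp [bLoop, hgx]
        rw [hstep]
        by_cases hk1 : k ≤ (1:Int)
        · rw [if_pos hk1]
          have hk := hpos x k hgx
          refine iff_of_true rfl ⟨x, k, hgx, ?_⟩
          have h1 : k.toNat = 1 := by omega
          rw [h1]
          exact ⟨[], rest, by simp⟩
        · rw [if_neg hk1]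
          have hnot' : ∀ y k', need.get? y = some k' →
              ¬ List.replicate k'.toNat y <:+: List.replicate (1:Int).toNat x := by
            intro y k' hy hinf
            rcases (replicate_infix_replicate y x k'.toNat (1:Int).toNat).mp hinf with ⟨hle, h0 | rfl⟩
            · have := hpos y k' hy; omega
            · rw [hy] at hgx
              injection hgx with hkk
              subst hkk
              have := hpos y k' hy
              omega
          rw [ih x 1 (some x) (Or.inr ⟨rfl, le_refl 1⟩) hnot']
    · -- prev = some c, 1 ≤ r
      by_cases hcx : c = x
      · subst hcx
        have hpadeq : (List.replicate r.toNat c ++ c :: rest) =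
            (List.replicate (r + 1).toNat c ++ rest) := by
          have h1 : (r + 1).toNat = r.toNat + 1 := by omega
          rw [h1, List.replicate_succ']
          simp
        rw [hpadeq]
        rcases hgx : need.get? c with _ | k
        · have hstep : bLoop need (c :: rest) (some c) r = bLoop need rest (some c) (r + 1) := by
            simp [bLoop, hgx]
          have hnot' : ∀ y k, need.get? y = some k →
              ¬ List.replicate k.toNat y <:+: List.replicate (r+1).toNat c := by
            intro y k hy hinf
            rcases (replicate_infix_replicate y c k.toNat (r+1).toNat).mp hinf with ⟨hle, h0 | rfl⟩
            · have := hpos y k hy; omega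
            · rw [hy] at hgx; cases hgx
          rw [hstep, ih c (r + 1) (some c) (Or.inr ⟨rfl, by omega⟩) hnot']
        · have hstep : bLoop need (c :: rest) (some c) r =
              (if k ≤ r + 1 then true else bLoop need rest (some c) (r + 1)) := by
            simp [bLoop, hgx]
          rw [hstep]
          by_cases hk1 : k ≤ r + 1
          · rw [if_pos hk1]
            have hk := hpos c k hgx
            refine iff_of_true rfl ⟨c, k, hgx, ?_⟩
            calc List.replicate k.toNat c <:+: List.replicate (r+1).toNat c := by
                  rw [replicate_infix_replicate]; exact ⟨by omega, Or.inr rfl⟩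
              _ <:+: List.replicate (r+1).toNat c ++ rest := ⟨[], rest, by simp⟩
          · rw [if_neg hk1]
            have hnot' : ∀ y k', need.get? y = some k' →
                ¬ List.replicate k'.toNat y <:+: List.replicate (r+1).toNat c := by
              intro y k' hy hinf
              rcases (replicate_infix_replicate y c k'.toNat (r+1).toNat).mp hinf with ⟨hle, h0 | rfl⟩
              · have := hpos y k' hy; omega
              · rw [hy] at hgx
                injection hgx with hkk
                subst hkk
                have := hpos y k' hy
                omega
            rw [ih c (r + 1) (some c) (Or.inr ⟨rfl, by omega⟩) hnot']
      · -- c ≠ x : the run resets to 1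
        have hsplit : ∀ y k, need.get? y = some k →
            (List.replicate k.toNat y <:+: (List.replicate r.toNat c ++ x :: rest) ↔
             List.replicate k.toNat y <:+: (x :: rest)) := by
          intro y k hy
          rw [infix_straddle y x c k.toNat r.toNat (by have := hpos y k hy; omega) hcx rest]
          constructor
          · rintro (h | h)
            · exact absurd h (hnot y k hy)
            · exact h
          · exact Or.inr
        have hRHS : (∃ y k, need.get? y = some k ∧
              List.replicate k.toNat y <:+: (List.replicate r.toNat c ++ x :: rest)) ↔
            (∃ y k, need.get? y = some k ∧
              List.replicate k.toNat y <:+: (List.replicate (1:Int).toNat x ++ rest)) := by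
          constructor <;> rintro ⟨y, k, hy, h⟩
          · exact ⟨y, k, hy, by simpa using (hsplit y k hy).mp h⟩
          · exact ⟨y, k, hy, (hsplit y k hy).mpr (by simpa using h)⟩
        rw [hRHS]
        rcases hgx : need.get? x with _ | k
        · have hstep : bLoop need (x :: rest) (some c) r = bLoop need rest (some x) 1 := by
            simp [bLoop, hgx, hcx]
          have hnot' : ∀ y k, need.get? y = some k →
              ¬ List.replicate k.toNat y <:+: List.replicate (1:Int).toNat x := by
            intro y k hy hinf
            rcases (replicate_infix_replicate y x k.toNat (1:Int).toNat).mp hinf with ⟨hle, h0 | rfl⟩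
            · have := hpos y k hy; omega
            · rw [hy] at hgx; cases hgx
          rw [hstep, ih x 1 (some x) (Or.inr ⟨rfl, le_refl 1⟩) hnot']
        · have hstep : bLoop need (x :: rest) (some c) r =
              (if k ≤ (1:Int) then true else bLoop need rest (some x) 1) := by
            simp [bLoop, hgx, hcx]
          rw [hstep]
          by_cases hk1 : k ≤ (1:Int)
          · rw [if_pos hk1]
            have hk := hpos x k hgx
            refine iff_of_true rfl ⟨x, k, hgx, ?_⟩
            have h1 : k.toNat = 1 := by omega
            rw [h1]
            exact ⟨[], rest, by simp⟩
          · rw [if_neg hk1]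
            have hnot' : ∀ y k', need.get? y = some k' →
                ¬ List.replicate k'.toNat y <:+: List.replicate (1:Int).toNat x := by
              intro y k' hy hinf
              rcases (replicate_infix_replicate y x k'.toNat (1:Int).toNat).mp hinf with ⟨hle, h0 | rfl⟩
              · have := hpos y k' hy; omega
              · rw [hy] at hgx
                injection hgx with hkk
                subst hkk
                have := hpos y k' hy
                omega
            rw [ih x 1 (some x) (Or.inr ⟨rfl, le_refl 1⟩) hnot']

theorem bAlt_iff (bag : List Int) (allowed : List Int)
    (hpre : ∀ o ∈ allowed, 0 ≤ o ∧ o < 5) :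
    check_combo_sim_py_alt bag allowed = true ↔
      ∃ o ∈ allowed, List.replicate (o + 2).toNat o <:+: bag := by
  have hpos : ∀ x k, (bNeedMap allowed).get? x = some k → 1 ≤ k := by
    intro x k h
    rw [bNeedMap_get?] at h
    by_cases hm : x ∈ allowed
    · rw [if_pos hm] at h
      injection h with h
      obtain ⟨h0, h5⟩ := hpre x hm
      rw [bNeedOf_valid x h0 h5] at h
      omega
    · rw [if_neg hm] at h; cases h
  have hnot : ∀ y k, (bNeedMap allowed).get? y = some k →
      ¬ List.replicate k.toNat y <:+: List.replicate (0:Int).toNat (0:Int) := by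
    intro y k hy hinf
    rcases (replicate_infix_replicate y 0 k.toNat (0:Int).toNat).mp hinf with ⟨hle, _⟩
    have := hpos y k hy
    omega
  rw [check_combo_sim_py_alt,
    bLoop_iff (bNeedMap allowed) hpos bag 0 0 none (Or.inl ⟨rfl, rfl⟩) hnot]
  constructor
  · rintro ⟨y, k, hy, h⟩
    rw [bNeedMap_get?] at hy
    by_cases hm : y ∈ allowed
    · rw [if_pos hm] at hy
      injection hy with hy
      obtain ⟨h0, h5⟩ := hpre y hm
      rw [bNeedOf_valid y h0 h5] at hy
      subst hy
      exact ⟨y, hm, by simpa using h⟩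
    · rw [if_neg hm] at hy; cases hy
  · rintro ⟨o, ho, h⟩
    obtain ⟨h0, h5⟩ := hpre o ho
    refine ⟨o, o + 2, ?_, by simpa using h⟩
    rw [bNeedMap_get?, if_pos ho, bNeedOf_valid o h0 h5]

-- ===== VERDICT (by name: the statement is the Claim_ definition above) =====
theorem check_combo_sim_py_spec : Claim_equal_check_combo_sim_py := by
  intro bag allowed _ hpre
  unfold Spec_check_combo_sim_py
  have hA := aLoop_iff bag allowed hpre
  have hB := bAlt_iff bag allowed hpre
  unfold check_combo_sim_py
  rcases h : aLoop bag allowed with _ | _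
  · rcases hb : check_combo_sim_py_alt bag allowed with _ | _
    · rfl
    · exact absurd (hA.mpr (hB.mp hb)) (by simp [h])
  · exact (hB.mpr (hA.mp h)).symm
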